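-- pv_equiv track=rewrite | github.com/namansharma18899/dsa | Daily Challenges/2023/jan/1-1-23.py | checkPattern
-- ===== SOURCE A (Python) =====
-- def checkPattern(arr,start,end,pattern):
--     keyval = {}
--     patter_index = 0
--     visited = set()
--     for index in range(start,end):
--         char = arr[index]
--         curr_pattern_char=pattern[patter_index]
--         if char not in visited:
--             visited.add(char)
--             if not curr_pattern_char not in keyval:
--                 return False
--             else:
--                 # pattern[patter_index]
--                 keyval[curr_pattern_char]=char
--         else:
--             # pattern[patter_index]
--             try:
--                 if keyval[curr_pattern_char]!=char:
--                     return False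
--             except Exception as e:
--                 return False
--         patter_index+=1
--     return True
-- ===== SOURCE B (Python) =====
-- def checkPattern(arr, start, end, pattern):
--     chars = [arr[i] for i in range(start, end)]
--     pats = pattern[:len(chars)]
--     return [chars.index(c) for c in chars] == [pats.index(p) for p in pats]
-- ===== Notes on version B (the rewrite author's own statement) =====
-- stated objective: simpler
-- what changed: Replaced A's single-pass dict+visited-set bijection check with a staged normalization: materialize the window and the pattern prefix, map each to its canonical first-occurrence-index form with list.index/str.index, and compare the two canonical lists; no dict, no per-step branching (B trades A's linear pass for a quadratic but much shorter normalize-and-compare).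
-- outside the precondition, e.g. on checkPattern(['a', 'a'], 0, 5, 'xy'): A returns False, B raises IndexError
import Mathlib
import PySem

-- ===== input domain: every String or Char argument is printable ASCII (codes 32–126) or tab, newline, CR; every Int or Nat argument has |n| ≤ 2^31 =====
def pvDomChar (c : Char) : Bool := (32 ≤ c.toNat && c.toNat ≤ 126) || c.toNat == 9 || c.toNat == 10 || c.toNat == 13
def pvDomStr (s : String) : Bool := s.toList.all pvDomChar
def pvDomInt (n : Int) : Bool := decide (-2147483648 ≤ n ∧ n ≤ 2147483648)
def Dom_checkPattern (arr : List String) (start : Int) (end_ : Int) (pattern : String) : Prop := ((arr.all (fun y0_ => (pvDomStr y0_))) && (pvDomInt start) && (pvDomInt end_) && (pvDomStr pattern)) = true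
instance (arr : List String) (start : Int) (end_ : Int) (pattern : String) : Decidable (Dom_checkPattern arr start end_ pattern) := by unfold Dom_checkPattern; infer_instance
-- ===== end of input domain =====

-- B replaces A's single-pass dict+visited-set loop with staged normalization: build the window and pattern prefix, compare their first-occurrence-index canonical forms (shorter, though quadratic).


-- ===== PORT A =====
-- literal transliteration of A's loop: keyval dict, patter_index counter, visited set, early returns via Bool
def pvLoopA (arr : List String) (pattern : String) :
    List Int → PySem.Dict Char String → Int → PySem.Set String → Bool
  | [], _, _, _ => true
  | index :: rest, keyval, patter_index, visited =>
    let char := (PySem.List.pyGet? arr index).getD ""          -- arr[index]; Pre_ keeps it in range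
    let cp := (PySem.Str.pyGet? pattern patter_index).getD ' ' -- pattern[patter_index]; Pre_ keeps it in range
    if char ∉ visited then
      let visited' := PySem.Set.add visited char
      if keyval.contains cp then false                         -- 'if not cp not in keyval: return False'
      else pvLoopA arr pattern rest (keyval.insert cp char) (patter_index + 1) visited'
    else
      match keyval.get? cp with
      | none => false                                          -- KeyError caught → return False
      | some v => if v != char then false
                  else pvLoopA arr pattern rest keyval (patter_index + 1) visited

def checkPattern (arr : List String) (start : Int) (end_ : Int) (pattern : String) : Bool :=
  pvLoopA arr pattern (PySem.List.pyRange start end_ 1) PySem.Dict.empty 0 PySem.Set.empty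

-- ===== PORT B =====
-- canonical form: each element replaced by the index of its first occurrence ('[xs.index(x) for x in xs]');
-- .getD 0 never fires: x ∈ xs, so list.index/str.index (a single char) cannot raise
def pvCanon {α : Type} [BEq α] (xs : List α) : List Int :=
  xs.map (fun x => (((PySem.List.index? xs x).getD 0 : Nat) : Int))

def checkPattern_alt (arr : List String) (start : Int) (end_ : Int) (pattern : String) : Bool :=
  let chars := (PySem.List.pyRange start end_ 1).map (fun i => (PySem.List.pyGet? arr i).getD "")
  let pats := PySem.List.slice pattern.toList none (some (chars.length : Int))  -- pattern[:len(chars)] on code points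
  pvCanon chars == pvCanon pats

-- ===== PRECONDITION & SPEC =====
-- Pre_ excludes inputs where some index of range(start,end) is out of range for arr or pattern:
-- there A usually raises (IndexError / negative wraparound past the bound), though on some of them A
-- still returns False early before reaching the bad index while B raises building its lists (see cites).
def Pre_checkPattern (arr : List String) (start : Int) (end_ : Int) (pattern : String) : Prop :=
  start < end_ → (-(arr.length : Int) ≤ start ∧ end_ ≤ (arr.length : Int) ∧ end_ - start ≤ (pattern.toList.length : Int))
instance (arr : List String) (start : Int) (end_ : Int) (pattern : String) : Decidable (Pre_checkPattern arr start end_ pattern) := by unfold Pre_checkPattern; infer_instance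
def pvWitness_checkPattern : List String × Int × Int × String := (["a", "b", "a"], 0, 3, "xyx")
def Spec_checkPattern (arr : List String) (start : Int) (end_ : Int) (pattern : String) (out : Bool) : Prop := out = checkPattern_alt arr start end_ pattern
instance (arr : List String) (start : Int) (end_ : Int) (pattern : String) (out : Bool) : Decidable (Spec_checkPattern arr start end_ pattern out) := by unfold Spec_checkPattern; infer_instance

-- ===== CLAIM (what is proved, stated in full; the proofs are below) =====
def Claim_equal_checkPattern : Prop := ∀ (arr : List String) (start : Int) (end_ : Int) (pattern : String), Dom_checkPattern arr start end_ pattern → Pre_checkPattern arr start end_ pattern → Spec_checkPattern arr start end_ pattern (checkPattern arr start end_ pattern)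

-- ===== LEMMAS AND PROOFS =====

-- the isomorphism condition both programs decide, stated position-free on the zipped window/pattern pairs
def pvMatches (zs : List (String × Char)) : Prop :=
  ∀ x ∈ zs, ∀ y ∈ zs, (x.1 = y.1 ↔ x.2 = y.2)

lemma pvMatches_tail {z : String × Char} {zs : List (String × Char)}
    (h : pvMatches (z :: zs)) : pvMatches zs :=
  fun x hx y hy => h x (List.mem_cons_of_mem _ hx) y (List.mem_cons_of_mem _ hy)

lemma pvMatches_sub {pre big : List (String × Char)} (h : pvMatches big)
    (hsub : ∀ x ∈ pre, x ∈ big) : pvMatches pre :=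
  fun x hx y hy => h x (hsub x hx) y (hsub y hy)

-- first-occurrence index is injective on members
lemma pv_index?_inj {α : Type} [BEq α] [LawfulBEq α] {l : List α} {x y : α} (hx : x ∈ l)
    (h : PySem.List.index? l x = PySem.List.index? l y) : x = y := by
  obtain ⟨k, hk⟩ := Option.isSome_iff_exists.mp ((PySem.List.index?_isSome_iff l x).mpr hx)
  obtain ⟨hk1, hx1, -⟩ := PySem.List.getElem_of_index?_eq_some hk
  rw [h] at hk
  obtain ⟨hk2, hy1, -⟩ := PySem.List.getElem_of_index?_eq_some hk
  rw [← hx1, ← hy1]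

lemma pv_matches_index (zs : List (String × Char)) (h : pvMatches zs) :
    ∀ z ∈ zs, PySem.List.index? (zs.map Prod.fst) z.1 = PySem.List.index? (zs.map Prod.snd) z.2 := by
  induction zs with
  | nil => intro z hz; cases hz
  | cons a rest ih =>
    intro z hz
    have hap : z.1 = a.1 ↔ z.2 = a.2 := h z hz a (List.mem_cons_self)
    by_cases h1 : z.1 = a.1
    · have h2 := hap.mp h1
      simp only [List.map_cons, h1, h2, PySem.List.index?_cons_self]
    · have h2 : z.2 ≠ a.2 := fun e => h1 (hap.mpr e)
      have hz' : z ∈ rest := by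
        rcases List.mem_cons.mp hz with rfl | hz'
        · exact absurd rfl h1
        · exact hz'
      simp only [List.map_cons,
        PySem.List.index?_cons_of_ne _ (Ne.symm h1),
        PySem.List.index?_cons_of_ne _ (Ne.symm h2),
        ih (pvMatches_tail h) z hz']

-- canonical-form comparison decides exactly pvMatches
lemma pv_canon_iff (zs : List (String × Char)) :
    pvCanon (zs.map Prod.fst) = pvCanon (zs.map Prod.snd) ↔ pvMatches zs := by
  unfold pvCanon
  rw [List.map_map, List.map_map, List.map_inj_left]
  constructor
  · intro h x hx y hy
    have hx1 : x.1 ∈ zs.map Prod.fst := List.mem_map_of_mem hx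
    have hy1 : y.1 ∈ zs.map Prod.fst := List.mem_map_of_mem hy
    have hx2 : x.2 ∈ zs.map Prod.snd := List.mem_map_of_mem hx
    have hy2 : y.2 ∈ zs.map Prod.snd := List.mem_map_of_mem hy
    obtain ⟨kx1, ex1⟩ := Option.isSome_iff_exists.mp ((PySem.List.index?_isSome_iff _ _).mpr hx1)
    obtain ⟨ky1, ey1⟩ := Option.isSome_iff_exists.mp ((PySem.List.index?_isSome_iff _ _).mpr hy1)
    obtain ⟨kx2, ex2⟩ := Option.isSome_iff_exists.mp ((PySem.List.index?_isSome_iff _ _).mpr hx2)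
    obtain ⟨ky2, ey2⟩ := Option.isSome_iff_exists.mp ((PySem.List.index?_isSome_iff _ _).mpr hy2)
    have hxe := h x hx
    have hye := h y hy
    simp only [Function.comp_apply] at hxe hye
    rw [ex1, ex2] at hxe; rw [ey1, ey2] at hye
    simp only [Option.getD_some] at hxe hye
    constructor
    · intro e
      apply pv_index?_inj hx2
      rw [ex2, ey2]
      have h1 : kx1 = ky1 := by
        have := ex1.symm.trans (e ▸ ey1)
        exact Option.some.inj this
      have h2 : kx2 = ky2 := by omega
      rw [h2]
    · intro e
      apply pv_index?_inj hx1
      rw [ex1, ey1]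
      have h2 : kx2 = ky2 := by
        have := ex2.symm.trans (e ▸ ey2)
        exact Option.some.inj this
      have h1 : kx1 = ky1 := by omega
      rw [h1]
  · intro h z hz
    simp only [Function.comp_apply]
    rw [pv_matches_index zs h z hz]

-- A's loop restated over the zipped pairs (proof helper; bridged to pvLoopA below)
def pvLoopZ : List (String × Char) → PySem.Dict Char String → PySem.Set String → Bool
  | [], _, _ => true
  | (c, p) :: rest, kv, vis =>
    if c ∉ vis then
      if kv.contains p then false
      else pvLoopZ rest (kv.insert p c) (PySem.Set.add vis c)
    else
      match kv.get? p with
      | none => false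
      | some v => if v != c then false else pvLoopZ rest kv vis

def pvZip (arr : List String) (pattern : String) : Int → List Int → List (String × Char)
  | _, [] => []
  | off, i :: r =>
    ((PySem.List.pyGet? arr i).getD "", (PySem.Str.pyGet? pattern off).getD ' ') ::
      pvZip arr pattern (off + 1) r

lemma pvLoopA_eq_loopZ (arr : List String) (pattern : String) :
    ∀ (idxs : List Int) (kv : PySem.Dict Char String) (off : Int) (vis : PySem.Set String),
    pvLoopA arr pattern idxs kv off vis = pvLoopZ (pvZip arr pattern off idxs) kv vis := by
  intro idxs
  induction idxs with
  | nil => intro kv off vis; rfl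
  | cons i rest ih =>
    intro kv off vis
    simp only [pvLoopA, pvZip, pvLoopZ]
    by_cases hv : (PySem.List.pyGet? arr i).getD "" ∈ vis
    · simp only [hv, not_true_eq_false, if_false]
      cases (kv.get? ((PySem.Str.pyGet? pattern off).getD ' ')) with
      | none => rfl
      | some v =>
        by_cases he : v = (PySem.List.pyGet? arr i).getD ""
        · simp [he, ih]
        · simp [he]
    · simp only [hv, not_false_eq_true, if_true]
      rw [ih]

lemma pvZip_eq (arr : List String) (pattern : String) :
    ∀ (idxs : List Int) (off : Nat), off + idxs.length ≤ pattern.toList.length →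
    pvZip arr pattern (off : Int) idxs =
      (idxs.map (fun i => (PySem.List.pyGet? arr i).getD "")).zip
        ((pattern.toList.drop off).take idxs.length) := by
  intro idxs
  induction idxs with
  | nil => intro off _; simp [pvZip]
  | cons i rest ih =>
    intro off hlen
    have hofflt : off < pattern.toList.length := by
      simp only [List.length_cons] at hlen; omega
    have hhd : (PySem.Str.pyGet? pattern (off : Int)).getD ' ' = pattern.toList[off] := by
      simp [List.getElem?_eq_getElem hofflt]
    have hdrop : pattern.toList.drop off = pattern.toList[off] :: pattern.toList.drop (off + 1) :=
      List.drop_eq_getElem_cons hofflt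
    have hrec := ih (off + 1) (by simp only [List.length_cons] at hlen; omega)
    simp only [pvZip, List.map_cons, hdrop, List.length_cons, List.take_succ_cons, List.zip_cons_cons]
    rw [hhd]
    have : ((off : Int) + 1) = ((off + 1 : Nat) : Int) := by push_cast; ring
    rw [this, hrec]

-- core invariant: A's loop state (kv, vis) summarizes the already-consumed pairs 'pre'
lemma pvLoopZ_iff :
    ∀ (zs pre : List (String × Char)) (kv : PySem.Dict Char String) (vis : PySem.Set String),
    pvMatches pre →
    (∀ c, c ∈ vis ↔ ∃ p, (c, p) ∈ pre) →
    (∀ p c, kv.get? p = some c ↔ (c, p) ∈ pre) →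
    (pvLoopZ zs kv vis = true ↔ pvMatches (pre ++ zs)) := by
  intro zs
  induction zs with
  | nil =>
    intro pre kv vis hM hvis hkv
    simpa [pvLoopZ] using hM
  | cons z rest ih =>
    obtain ⟨c, p⟩ := z
    intro pre kv vis hM hvis hkv
    simp only [pvLoopZ]
    by_cases hv : c ∈ vis
    · rw [if_neg (not_not_intro hv)]
      obtain ⟨p0, hp0⟩ := (hvis c).mp hv
      cases hget : kv.get? p with
      | none =>
        have hpn : ∀ c', (c', p) ∉ pre := fun c' hmem => by
          have := (hkv p c').mpr hmem; rw [hget] at this; cases this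
        simp only [Bool.false_eq_true, false_iff]
        intro hMall
        have hxy := hMall (c, p0) (List.mem_append_left _ hp0) (c, p)
          (List.mem_append_right _ List.mem_cons_self)
        have hpp : p0 = p := hxy.mp rfl
        exact hpn c (hpp ▸ hp0)
      | some v =>
        by_cases hvc : v = c
        · subst hvc
          simp only [bne_self_eq_false, Bool.false_eq_true, if_false]
          have hvp : (v, p) ∈ pre := (hkv p v).mp hget
          have hM' : pvMatches (pre ++ [(v, p)]) := pvMatches_sub hM (by
            intro x hx
            rcases List.mem_append.mp hx with h' | h'
            · exact h'
            · simpa using (List.mem_singleton.mp h') ▸ hvp)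
          have hvis' : ∀ c', c' ∈ vis ↔ ∃ p', (c', p') ∈ pre ++ [(v, p)] := by
            intro c'
            rw [hvis c']
            constructor
            · rintro ⟨p', hp'⟩; exact ⟨p', List.mem_append_left _ hp'⟩
            · rintro ⟨p', hp'⟩
              rcases List.mem_append.mp hp' with h' | h'
              · exact ⟨p', h'⟩
              · have he := List.mem_singleton.mp h'
                rw [Prod.mk.injEq] at he
                obtain ⟨he1, he2⟩ := he
                subst he1
                exact ⟨p, hvp⟩
          have hkv' : ∀ p' c', kv.get? p' = some c' ↔ (c', p') ∈ pre ++ [(v, p)] := by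
            intro p' c'
            rw [hkv p' c']
            constructor
            · exact List.mem_append_left _
            · intro h'
              rcases List.mem_append.mp h' with h'' | h''
              · exact h''
              · have he := List.mem_singleton.mp h''
                rw [Prod.mk.injEq] at he
                rw [he.1, he.2]
                exact hvp
          rw [ih (pre ++ [(v, p)]) kv vis hM' hvis' hkv', ← List.append_cons]
        · have : (v != c) = true := bne_iff_ne.mpr hvc
          simp only [this, if_true, Bool.false_eq_true, false_iff]
          intro hMall
          have hvp : (v, p) ∈ pre := (hkv p v).mp hget
          have hxy := hMall (v, p) (List.mem_append_left _ hvp) (c, p)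
            (List.mem_append_right _ List.mem_cons_self)
          have hcc : v = c := hxy.mpr rfl
          exact hvc hcc
    · rw [if_pos hv]
      have hc_fresh : ∀ p', (c, p') ∉ pre := fun p' hm => hv ((hvis c).mpr ⟨p', hm⟩)
      by_cases hcont : kv.contains p
      · simp only [hcont, if_true, Bool.false_eq_true, false_iff]
        intro hMall
        have hsome : (kv.get? p).isSome := by
          rw [← PySem.Dict.contains_eq_isSome_get?]; exact hcont
        obtain ⟨c', hc'⟩ := Option.isSome_iff_exists.mp hsome
        have hmem : (c', p) ∈ pre := (hkv p c').mp hc'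
        have hxy := hMall (c', p) (List.mem_append_left _ hmem) (c, p)
          (List.mem_append_right _ List.mem_cons_self)
        have hcc : c' = c := hxy.mpr rfl
        exact hc_fresh p (hcc ▸ hmem)
      · simp only [hcont, Bool.false_eq_true, if_false]
        have hp_fresh : ∀ c', (c', p) ∉ pre := fun c' hm => by
          have := (hkv p c').mpr hm
          rw [(PySem.Dict.get?_eq_none_iff_contains kv p).mpr (by simpa using hcont)] at this
          cases this
        have hM' : pvMatches (pre ++ [(c, p)]) := by
          intro x hx y hy
          rcases List.mem_append.mp hx with hx' | hx' <;>
            rcases List.mem_append.mp hy with hy' | hy'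
          · exact hM x hx' y hy'
          · obtain rfl := List.mem_singleton.mp hy'
            constructor
            · intro e
              have e' : x.1 = c := e
              exact absurd (show (c, x.2) ∈ pre by rw [← e']; simpa using hx') (hc_fresh x.2)
            · intro e
              have e' : x.2 = p := e
              exact absurd (show (x.1, p) ∈ pre by rw [← e']; simpa using hx') (hp_fresh x.1)
          · obtain rfl := List.mem_singleton.mp hx'
            constructor
            · intro e
              have e' : c = y.1 := e
              exact absurd (show (c, y.2) ∈ pre by rw [e']; simpa using hy') (hc_fresh y.2)
            · intro e
              have e' : p = y.2 := e
              exact absurd (show (y.1, p) ∈ pre by rw [e']; simpa using hy') (hp_fresh y.1)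
          · obtain rfl := List.mem_singleton.mp hx'
            obtain rfl := List.mem_singleton.mp hy'
            simp
        have hvis' : ∀ c', c' ∈ PySem.Set.add vis c ↔ ∃ p', (c', p') ∈ pre ++ [(c, p)] := by
          intro c'
          rw [PySem.Set.mem_add]
          constructor
          · rintro (h' | rfl)
            · obtain ⟨p', hp'⟩ := (hvis c').mp h'
              exact ⟨p', List.mem_append_left _ hp'⟩
            · exact ⟨p, List.mem_append_right _ List.mem_cons_self⟩
          · rintro ⟨p', hp'⟩
            rcases List.mem_append.mp hp' with h'' | h''
            · exact Or.inl ((hvis c').mpr ⟨p', h''⟩)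
            · have he := List.mem_singleton.mp h''
              rw [Prod.mk.injEq] at he
              obtain ⟨rfl, rfl⟩ := he
              exact Or.inr rfl
        have hkv' : ∀ p' c', (kv.insert p c).get? p' = some c' ↔ (c', p') ∈ pre ++ [(c, p)] := by
          intro p' c'
          rw [PySem.Dict.get?_insert]
          by_cases hpp : p' = p
          · subst hpp
            rw [if_pos rfl]
            constructor
            · intro h
              obtain rfl := Option.some.inj h
              exact List.mem_append_right _ List.mem_cons_self
            · intro h'
              rcases List.mem_append.mp h' with h'' | h''
              · exact absurd h'' (hp_fresh c')
              · have he := List.mem_singleton.mp h''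
                rw [Prod.mk.injEq] at he
                rw [he.1]
          · simp only [if_neg hpp]
            rw [hkv p' c']
            constructor
            · exact List.mem_append_left _
            · intro h'
              rcases List.mem_append.mp h' with h'' | h''
              · exact h''
              · have he := List.mem_singleton.mp h''
                rw [Prod.mk.injEq] at he
                obtain ⟨-, rfl⟩ := he
                exact absurd rfl hpp
        rw [ih (pre ++ [(c, p)]) (kv.insert p c) (PySem.Set.add vis c) hM' hvis' hkv',
          ← List.append_cons]

-- ===== VERDICT (by name: the statement is the Claim_ definition above) =====
theorem checkPattern_spec : Claim_equal_checkPattern := by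
  intro arr start end_ pattern _ hpre
  unfold Spec_checkPattern checkPattern checkPattern_alt
  set idxs := PySem.List.pyRange start end_ 1 with hidxs
  set chars := idxs.map (fun i => (PySem.List.pyGet? arr i).getD "") with hchars
  have hn : chars.length = idxs.length := List.length_map ..
  have hnlen : idxs.length ≤ pattern.toList.length := by
    rw [hidxs, PySem.List.length_pyRange_one]
    by_cases hlt : start < end_
    · obtain ⟨-, -, h3⟩ := hpre hlt; omega
    · omega
  have hpats : PySem.List.slice pattern.toList none (some (chars.length : Int)) =
      pattern.toList.take chars.length := PySem.List.slice_to_natCast ..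
  have hzip : pvZip arr pattern 0 idxs = chars.zip (pattern.toList.take chars.length) := by
    have := pvZip_eq arr pattern idxs 0 (by omega)
    simpa [hn] using this
  have hlen_pats : (pattern.toList.take chars.length).length = chars.length := by
    rw [List.length_take]; omega
  set zs := chars.zip (pattern.toList.take chars.length) with hzs
  have hfst : zs.map Prod.fst = chars := List.map_fst_zip (le_of_eq hlen_pats.symm)
  have hsnd : zs.map Prod.snd = pattern.toList.take chars.length :=
    List.map_snd_zip (le_of_eq hlen_pats)
  have hA : pvLoopA arr pattern idxs PySem.Dict.empty 0 PySem.Set.empty = true ↔ pvMatches zs := by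
    rw [pvLoopA_eq_loopZ, hzip]
    have := pvLoopZ_iff zs [] PySem.Dict.empty PySem.Set.empty
      (fun x hx => absurd hx (List.not_mem_nil))
      (by intro c; simp [PySem.Set.empty])
      (by intro p c; simp [PySem.Dict.get?_empty])
    simpa using this
  have hB : (pvCanon chars == pvCanon (pattern.toList.take chars.length)) = true ↔ pvMatches zs := by
    rw [beq_iff_eq, ← hsnd, ← hfst]
    exact pv_canon_iff zs
  rw [Bool.eq_iff_iff, hA]
  show pvMatches zs ↔
    (pvCanon chars == pvCanon (PySem.List.slice pattern.toList none (some (chars.length : Int)))) = true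
  rw [hpats]
  exact hB.symm
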